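-- pv_equiv track=rewrite | github.com/DaniElectra/libcipher | libcipher/morse.py | decrypt_morse
-- ===== SOURCE A (Python) =====
-- import collections
--
-- MorseDictionaryLetters = collections.OrderedDict({ 'A':'.-', 'B':'-...',
--                     'C':'-.-.', 'D':'-..', 'E':'.',
--                     'F':'..-.', 'G':'--.', 'H':'....',
--                     'I':'..', 'J':'.---', 'K':'-.-',
--                     'L':'.-..', 'M':'--', 'N':'-.',
--                     'O':'---', 'P':'.--.', 'Q':'--.-',
--                     'R':'.-.', 'S':'...', 'T':'-',
--                     'U':'..-', 'V':'...-', 'W':'.--',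
--                     'X':'-..-', 'Y':'-.--', 'Z':'--..' })
--
-- MorseDictionary = { '0':'-----', '1':'.----', '2':'..---',
--                     '3':'...--', '4':'....-', '5':'.....',
--                     '6':'-....', '7':'--...', '8':'---..',
--                     '9':'----.', '.':'.-.-.-', ',':'--..--',
--                     '?':'..--..', '\'':'.----.', '!':'-.-.--',
--                     '/':'-..-.', '(':'-.--.', ')':'-.--.-',
--                     '&':'.-...', ':':'---...', ';':'-.-.-.',
--                     '=':'-...-', '+':'.-.-.', '-':'-....-',
--                     '_':'..--.-', '"':'.-..-.', '$':'...-..-',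
--                     '@':'.--.-.' }
--
-- def decrypt_morse(string: str, offset: int):
--     '''Decrypt a string using Morse code, and return the decoded string'''
--     # Add an ending space to detect the last character
--     string += ' '
--
--     # Create inverse dictionaries for easier lookup
--     InverseMorseDictionaryLetters = collections.OrderedDict({value: key for key, value in MorseDictionaryLetters.items()})
--     InverseMorseDictionary = {value: key for key, value in MorseDictionary.items()}
--
--     decipher = ''
--     ciphered_text = ''
--     for letter in string:
--         # Check if character is a space
--         if letter == ' ':
--             # Ignore if there is a slash or an extra space
--             if ciphered_text == '/':
--                 decipher += ' '
--                 ciphered_text = ''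
--                 continue
--
--             if ciphered_text == '':
--                 continue
--
--             # Decode character using inverse dictionary
--             try:
--                 letter_number = list(InverseMorseDictionaryLetters.keys()).index(ciphered_text) - offset
--                 if letter_number < 0:
--                     letter_number += len(InverseMorseDictionaryLetters)
--                 new_letter = list(InverseMorseDictionaryLetters)[letter_number]
--                 decipher += InverseMorseDictionaryLetters[new_letter]
--             except ValueError:
--                 decipher += InverseMorseDictionary[ciphered_text]
--             ciphered_text = ''
--         else:
--             # Store Morse code of single character
--             ciphered_text += letter
--
--     return decipher
-- ===== SOURCE B (Python) =====
-- import collections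
--
-- MorseDictionaryLetters = collections.OrderedDict({ 'A':'.-', 'B':'-...',
--                     'C':'-.-.', 'D':'-..', 'E':'.',
--                     'F':'..-.', 'G':'--.', 'H':'....',
--                     'I':'..', 'J':'.---', 'K':'-.-',
--                     'L':'.-..', 'M':'--', 'N':'-.',
--                     'O':'---', 'P':'.--.', 'Q':'--.-',
--                     'R':'.-.', 'S':'...', 'T':'-',
--                     'U':'..-', 'V':'...-', 'W':'.--',
--                     'X':'-..-', 'Y':'-.--', 'Z':'--..' })
--
-- MorseDictionary = { '0':'-----', '1':'.----', '2':'..---',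
--                     '3':'...--', '4':'....-', '5':'.....',
--                     '6':'-....', '7':'--...', '8':'---..',
--                     '9':'----.', '.':'.-.-.-', ',':'--..--',
--                     '?':'..--..', '\'':'.----.', '!':'-.-.--',
--                     '/':'-..-.', '(':'-.--.', ')':'-.--.-',
--                     '&':'.-...', ':':'---...', ';':'-.-.-.',
--                     '=':'-...-', '+':'.-.-.', '-':'-....-',
--                     '_':'..--.-', '"':'.-..-.', '$':'...-..-',
--                     '@':'.--.-.' }
--
-- def decrypt_morse(string: str, offset: int):
--     '''Decrypt a string using Morse code, and return the decoded string'''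
--     inverse_letters = {value: key for key, value in MorseDictionaryLetters.items()}
--     inverse_other = {value: key for key, value in MorseDictionary.items()}
--     codes = list(inverse_letters)
--
--     out = []
--     for token in string.split(' '):
--         if token == '':
--             continue
--         if token == '/':
--             out.append(' ')
--             continue
--         try:
--             pos = (codes.index(token) - offset) % 26
--             out.append(inverse_letters[codes[pos]])
--         except ValueError:
--             out.append(inverse_other[token])
--     return ''.join(out)
-- ===== Notes on version B (the rewrite author's own statement) =====
-- stated objective: idiomatic
-- what changed: B replaces A's char-by-char accumulator loop over string+' ' by iterating over string.split(' ') tokens, and replaces A's 'subtract offset, add 26 once if negative, rely on Python negative list indexing' by a single mod-26 position computation.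
import Mathlib
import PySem

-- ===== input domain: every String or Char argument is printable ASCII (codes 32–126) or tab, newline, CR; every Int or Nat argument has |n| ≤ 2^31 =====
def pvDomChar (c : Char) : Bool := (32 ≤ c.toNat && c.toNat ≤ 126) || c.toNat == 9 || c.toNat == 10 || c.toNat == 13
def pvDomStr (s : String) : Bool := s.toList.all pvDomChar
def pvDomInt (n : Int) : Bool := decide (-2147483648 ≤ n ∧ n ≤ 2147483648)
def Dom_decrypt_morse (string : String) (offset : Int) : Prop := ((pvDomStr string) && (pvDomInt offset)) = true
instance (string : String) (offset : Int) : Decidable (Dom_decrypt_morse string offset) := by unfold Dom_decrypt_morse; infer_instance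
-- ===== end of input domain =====

-- B replaces A's char-by-char accumulator loop (with its appended trailing space) by a split-on-space
-- token loop and replaces the "add 26 once, then rely on negative list indexing" offset arithmetic by
-- a single mod-26; objective: simpler/idiomatic, return value only (neither version mutates arguments).

-- module constants (dicts → association lists in insertion order)
def MorseDictionaryLetters : List (String × String) :=
  [("A", ".-"), ("B", "-..."), ("C", "-.-."), ("D", "-.."), ("E", "."),
   ("F", "..-."), ("G", "--."), ("H", "...."), ("I", ".."), ("J", ".---"),
   ("K", "-.-"), ("L", ".-.."), ("M", "--"), ("N", "-."), ("O", "---"),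
   ("P", ".--."), ("Q", "--.-"), ("R", ".-."), ("S", "..."), ("T", "-"),
   ("U", "..-"), ("V", "...-"), ("W", ".--"), ("X", "-..-"), ("Y", "-.--"),
   ("Z", "--..")]

def MorseDictionary : List (String × String) :=
  [("0", "-----"), ("1", ".----"), ("2", "..---"), ("3", "...--"), ("4", "....-"),
   ("5", "....."), ("6", "-...."), ("7", "--..."), ("8", "---.."), ("9", "----."),
   (".", ".-.-.-"), (",", "--..--"), ("?", "..--.."), ("'", ".----."), ("!", "-.-.--"),
   ("/", "-..-."), ("(", "-.--."), (")", "-.--.-"), ("&", ".-..."), (":", "---..."),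
   (";", "-.-.-."), ("=", "-...-"), ("+", ".-.-."), ("-", "-....-"), ("_", "..--.-"),
   ("\"", ".-..-."), ("$", "...-..-"), ("@", ".--.-.")]

-- the inverse dictionaries both functions build ({value: key for key, value in …}); code points as List Char
def pvInvLetters : PySem.Dict (List Char) (List Char) :=
  PySem.Dict.ofList (MorseDictionaryLetters.map (fun p => (p.2.toList, p.1.toList)))

def pvInvOther : PySem.Dict (List Char) (List Char) :=
  PySem.Dict.ofList (MorseDictionary.map (fun p => (p.2.toList, p.1.toList)))

-- ===== PORT A =====
-- A's try-block: list(Inv.keys()).index → offset arithmetic with a single +26 → Python list indexing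
-- (negative wraps; the 'none' of pyGet? is Python's uncaught IndexError, excluded by Pre_) → dict lookup;
-- the ValueError branch is the 'none' of index?; its KeyError ('get?' none) is excluded by Pre_.
def pvDecodeA (offset : Int) (ct : List Char) : List Char :=
  match PySem.List.index? pvInvLetters.keys ct with
  | some idx =>
      let letter_number : Int := (idx : Int) - offset
      let letter_number2 : Int := if letter_number < 0 then letter_number + 26 else letter_number
      match PySem.List.pyGet? pvInvLetters.keys letter_number2 with
      | some new_letter => (pvInvLetters.get? new_letter).getD []
      | none => []      -- IndexError: excluded by Pre_
  | none => (pvInvOther.get? ct).getD []   -- KeyError: excluded by Pre_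

-- one iteration of A's 'for letter in string' loop; state = (decipher, ciphered_text)
def pvAStep (offset : Int) (st : List Char × List Char) (letter : Char) : List Char × List Char :=
  if letter = ' ' then
    if st.2 = ['/'] then (st.1 ++ [' '], [])
    else if st.2 = [] then st
    else (st.1 ++ pvDecodeA offset st.2, [])
  else (st.1, st.2 ++ [letter])

def decrypt_morse (string : String) (offset : Int) : String :=
  String.ofList (((string.toList ++ [' ']).foldl (pvAStep offset) ([], [])).1)

-- ===== PORT B =====
-- B's try-block: codes.index → mod 26 → codes[pos] → dict lookup; except ValueError → other dict.
def pvDecodeB (offset : Int) (codes : List (List Char)) (tok : List Char) : List Char :=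
  match PySem.List.index? codes tok with
  | some i =>
      let pos : Int := PySem.Int.mod ((i : Int) - offset) 26
      match PySem.List.pyGet? codes pos with
      | some k => (pvInvLetters.get? k).getD []
      | none => []                         -- unreachable: 0 ≤ pos < 26
  | none => (pvInvOther.get? tok).getD []  -- KeyError: excluded by Pre_

-- one iteration of B's 'for token in string.split(' ')' loop; out = list of appended pieces
def pvBStep (offset : Int) (codes : List (List Char)) (acc : List (List Char)) (tok : List Char) :
    List (List Char) :=
  if tok = [] then acc
  else if tok = ['/'] then acc ++ [[' ']]
  else acc ++ [pvDecodeB offset codes tok]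

def decrypt_morse_alt (string : String) (offset : Int) : String :=
  let codes := pvInvLetters.keys
  let toks := (PySem.Chars.split? string.toList [' ']).getD []
  String.ofList (PySem.Chars.join [] (toks.foldl (pvBStep offset codes) []))

-- ===== PRECONDITION & SPEC =====
-- lists of morse codes, for stating the precondition without touching the ports
def pvCodes : List (List Char) := MorseDictionaryLetters.map (fun p => p.2.toList)
def pvOtherCodes : List (List Char) := MorseDictionary.map (fun p => p.2.toList)

-- a space-separated token A decodes without raising: empty, '/', a letter code whose shifted index
-- stays inside Python's single-wrap negative-indexing window, or a digit/punctuation code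
def pvGoodTok (offset : Int) (t : List Char) : Bool :=
  t == [] || t == ['/'] ||
  (match PySem.List.index? pvCodes t with
   | some i => decide (-52 ≤ (i : Int) - offset) && decide ((i : Int) - offset < 26)
   | none => pvOtherCodes.contains t)

-- Pre_ excludes exactly the inputs where Python A raises: a token in neither dictionary (KeyError),
-- or a letter token whose index minus offset leaves [-52, 26) (uncaught IndexError after the single +26).
def Pre_decrypt_morse (string : String) (offset : Int) : Prop :=
  (PySem.Chars.splitOn string.toList [' ']).all (pvGoodTok offset) = true

instance (string : String) (offset : Int) : Decidable (Pre_decrypt_morse string offset) := by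
  unfold Pre_decrypt_morse; infer_instance

def pvWitness_decrypt_morse : String × Int := ("... --- ... / .-", 1)

def Spec_decrypt_morse (string : String) (offset : Int) (out : String) : Prop :=
  out = decrypt_morse_alt string offset
instance (string : String) (offset : Int) (out : String) : Decidable (Spec_decrypt_morse string offset out) := by
  unfold Spec_decrypt_morse; infer_instance

-- ===== CLAIM (what is proved, stated in full; the proofs are below) =====
def Claim_equal_decrypt_morse : Prop := ∀ (string : String) (offset : Int), Dom_decrypt_morse string offset → Pre_decrypt_morse string offset → Spec_decrypt_morse string offset (decrypt_morse string offset)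

-- ===== LEMMAS AND PROOFS =====

-- proof-side splitter: split a char list on ' ' with the in-progress (reversed) token as accumulator
def pvSplitAux (l cur : List Char) : List (List Char) :=
  match l with
  | [] => [cur.reverse]
  | c :: r => if c = ' ' then cur.reverse :: pvSplitAux r [] else pvSplitAux r (c :: cur)

theorem pvGo_eq (fuel : Nat) (l cur : List Char) (acc : List (List Char)) (h : l.length < fuel) :
    PySem.Chars.splitOn.go [' '] fuel l cur acc = acc.reverse ++ pvSplitAux l cur := by
  induction fuel generalizing l cur acc with
  | zero => omega
  | succ fuel ih =>
    cases l with
    | nil => simp [PySem.Chars.splitOn.go, pvSplitAux]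
    | cons c r =>
      by_cases hc : c = ' '
      · subst hc
        rw [show PySem.Chars.splitOn.go [' '] (fuel + 1) (' ' :: r) cur acc
              = PySem.Chars.splitOn.go [' '] fuel r [] (cur.reverse :: acc) from by
            simp [PySem.Chars.splitOn.go, List.isPrefixOf]]
        rw [ih r [] (cur.reverse :: acc) (by simpa using Nat.lt_of_succ_lt_succ h)]
        simp [pvSplitAux]
      · rw [show PySem.Chars.splitOn.go [' '] (fuel + 1) (c :: r) cur acc
              = PySem.Chars.splitOn.go [' '] fuel r (c :: cur) acc from by
            simp [PySem.Chars.splitOn.go, List.isPrefixOf, Ne.symm hc]]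
        rw [ih r (c :: cur) acc (by simpa using Nat.lt_of_succ_lt_succ h)]
        simp [pvSplitAux, hc]

theorem pvSplitOn_eq (l : List Char) :
    PySem.Chars.splitOn l [' '] = pvSplitAux l [] := by
  unfold PySem.Chars.splitOn
  rw [pvGo_eq _ _ _ _ (by omega)]
  simp

-- the per-token result both loops append
def pvRender (offset : Int) : List (List Char) → List Char
  | [] => []
  | t :: ts =>
      (if t = [] then [] else if t = ['/'] then [' ']
       else pvDecodeB offset pvInvLetters.keys t) ++ pvRender offset ts

theorem pvKeys_eq : pvInvLetters.keys = pvCodes := by decide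

theorem pvGet_wrap (xs : List (List Char)) (a b : Int) (ha : a < 0)
    (hab : a + (xs.length : Int) = b) (hb0 : 0 ≤ b) (hb1 : b < (xs.length : Int)) :
    PySem.List.pyGet? xs a = PySem.List.pyGet? xs b := by
  simp only [PySem.List.pyGet?, PySem.List.pyIdx?]
  rw [if_neg (not_le.mpr ha), if_pos (by omega : -(xs.length : Int) ≤ a),
      if_pos hb0, if_pos hb1]
  have : xs.length - (-a).toNat = b.toNat := by omega
  rw [this]

theorem pvDecode_eq (offset : Int) (t : List Char) (hg : pvGoodTok offset t = true)
    (h1 : t ≠ []) (h2 : t ≠ ['/']) :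
    pvDecodeA offset t = pvDecodeB offset pvInvLetters.keys t := by
  unfold pvDecodeA pvDecodeB
  rw [pvKeys_eq]
  cases hix : PySem.List.index? pvCodes t with
  | none => rfl
  | some i =>
    have hi26 : i < 26 := by
      obtain ⟨hk, -, -⟩ := PySem.List.getElem_of_index?_eq_some hix
      simpa [show pvCodes.length = 26 from by decide] using hk
    have hb : -52 ≤ (i : Int) - offset ∧ (i : Int) - offset < 26 := by
      unfold pvGoodTok at hg
      rw [hix] at hg
      simp [h1, h2] at hg
      obtain ⟨hga, hgb⟩ := hg
      exact ⟨by omega, by omega⟩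
    simp only []
    congr 1
    -- both list indexings hit the same element
    set n : Int := (i : Int) - offset with hn
    have hq := PySem.Int.floordiv_mul_add_mod n 26
    have hm0 : 0 ≤ PySem.Int.mod n 26 := PySem.Int.mod_nonneg n (by norm_num)
    have hm1 : PySem.Int.mod n 26 < 26 := PySem.Int.mod_lt n (by norm_num)
    set m : Int := PySem.Int.mod n 26 with hmdef
    set q : Int := PySem.Int.floordiv n 26 with hqdef
    have hlen : pvCodes.length = 26 := by decide
    by_cases hneg : n < 0
    · simp only [if_pos hneg]
      by_cases hlow : n + 26 < 0
      · -- n ∈ [-52, -26): Python's negative indexing wraps once more; m = n + 52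
        exact pvGet_wrap pvCodes (n + 26) m hlow (by rw [hlen]; omega) hm0 (by rw [hlen]; omega)
      · -- n ∈ [-26, 0): n + 26 = m
        have hEq : n + 26 = m := by omega
        rw [hEq]
    · simp only [if_neg hneg]
      have hEq : n = m := by omega
      rw [hEq]

-- B's loop then join is pvRender
theorem pvJoin_nil (l : List (List Char)) : PySem.Chars.join [] l = l.flatten := by
  induction l with
  | nil => simp [PySem.Chars.join, List.intercalate]
  | cons x xs ih => cases xs <;> simp_all [PySem.Chars.join, List.intercalate, List.intersperse]

theorem pvBfold_eq (offset : Int) (toks : List (List Char)) (acc : List (List Char)) :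
    PySem.Chars.join [] (toks.foldl (pvBStep offset pvInvLetters.keys) acc)
      = PySem.Chars.join [] acc ++ pvRender offset toks := by
  induction toks generalizing acc with
  | nil => simp [pvRender]
  | cons t ts ih =>
    simp only [List.foldl_cons]
    by_cases h1 : t = []
    · rw [show pvBStep offset pvInvLetters.keys acc t = acc from by simp [pvBStep, h1]]
      rw [ih acc]
      simp [pvRender, h1]
    · by_cases h2 : t = ['/']
      · rw [show pvBStep offset pvInvLetters.keys acc t = acc ++ [[' ']] from by
            simp [pvBStep, h2]]
        rw [ih, pvJoin_nil, pvJoin_nil, List.flatten_append]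
        simp [pvRender, h2, List.append_assoc]
      · rw [show pvBStep offset pvInvLetters.keys acc t
              = acc ++ [pvDecodeB offset pvInvLetters.keys t] from by simp [pvBStep, h1, h2]]
        rw [ih, pvJoin_nil, pvJoin_nil, List.flatten_append]
        simp [pvRender, h1, h2, List.append_assoc]

-- A's loop over (chars ++ [' ']) renders the tokens of the split
theorem pvAfold_eq (offset : Int) (l : List Char) (d ct : List Char)
    (hg : ∀ t ∈ pvSplitAux l ct.reverse, pvGoodTok offset t = true) :
    ((l ++ [' ']).foldl (pvAStep offset) (d, ct)).1 = d ++ pvRender offset (pvSplitAux l ct.reverse) := by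
  induction l generalizing d ct with
  | nil =>
    have hgct : pvGoodTok offset ct = true := by
      have := hg ct; simp [pvSplitAux] at this; exact this
    simp only [List.nil_append, List.foldl_cons, List.foldl_nil, pvSplitAux, List.reverse_reverse]
    unfold pvAStep
    by_cases h2 : ct = ['/']
    · simp [h2, pvRender]
    · by_cases h1 : ct = []
      · simp [h1, h2, pvRender]
      · simp only [if_pos rfl, if_neg h2, if_neg h1]
        simp [pvRender, h1, h2, pvDecode_eq offset ct hgct h1 h2]
  | cons c r ih =>
    by_cases hc : c = ' '
    · subst hc
      have hsplit : pvSplitAux (' ' :: r) ct.reverse = ct :: pvSplitAux r [] := by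
        simp [pvSplitAux]
      rw [hsplit] at hg
      have hgct : pvGoodTok offset ct = true := hg ct (by simp)
      have hgr : ∀ t ∈ pvSplitAux r ([] : List Char).reverse, pvGoodTok offset t = true := by
        intro t ht; exact hg t (by simp at ht ⊢; right; simpa using ht)
      simp only [List.cons_append, List.foldl_cons]
      by_cases h2 : ct = ['/']
      · rw [show pvAStep offset (d, ct) ' ' = (d ++ [' '], []) from by simp [pvAStep, h2]]
        rw [ih (d ++ [' ']) [] hgr]
        simp only [List.reverse_nil]
        rw [hsplit]
        simp [pvRender, h2, List.append_assoc]
      · by_cases h1 : ct = []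
        · rw [show pvAStep offset (d, ct) ' ' = (d, ([] : List Char)) from by
              simp [pvAStep, h1, h2]]
          rw [ih d [] hgr]
          simp only [List.reverse_nil]
          rw [hsplit]
          simp [pvRender, h1, h2]
        · rw [show pvAStep offset (d, ct) ' ' = (d ++ pvDecodeA offset ct, []) from by
              simp [pvAStep, h1, h2]]
          rw [ih (d ++ pvDecodeA offset ct) [] hgr]
          simp only [List.reverse_nil]
          rw [hsplit]
          simp [pvRender, h1, h2, pvDecode_eq offset ct hgct h1 h2, List.append_assoc]
    · have hsplit : pvSplitAux (c :: r) ct.reverse = pvSplitAux r (ct ++ [c]).reverse := by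
        simp [pvSplitAux, hc]
      rw [hsplit] at hg
      simp only [List.cons_append, List.foldl_cons]
      rw [show pvAStep offset (d, ct) c = (d, ct ++ [c]) from by simp [pvAStep, hc]]
      rw [ih d (ct ++ [c]) hg]
      rw [hsplit]

-- ===== VERDICT (by name: the statement is the Claim_ definition above) =====
theorem decrypt_morse_spec : Claim_equal_decrypt_morse := by
  intro string offset _ hpre
  unfold Spec_decrypt_morse decrypt_morse decrypt_morse_alt
  have hsplit : (PySem.Chars.split? string.toList [' ']).getD []
      = pvSplitAux string.toList [] := by
    simp [PySem.Chars.split?, pvSplitOn_eq]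
  rw [hsplit]
  unfold Pre_decrypt_morse at hpre
  rw [pvSplitOn_eq] at hpre
  rw [List.all_eq_true] at hpre
  have hA := pvAfold_eq offset string.toList [] [] (by simpa using hpre)
  simp only [List.reverse_nil] at hA
  rw [hA]
  show String.ofList ([] ++ pvRender offset (pvSplitAux string.toList []))
      = String.ofList (PySem.Chars.join []
          (List.foldl (pvBStep offset pvInvLetters.keys) [] (pvSplitAux string.toList [])))
  rw [pvBfold_eq offset (pvSplitAux string.toList []) []]
  simp [PySem.Chars.join, List.intercalate]
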